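-- pv_equiv track=rewrite | github.com/boryanagoncharenko/CssCoco | csscoco/css/parser.py | _get_whitespace_values
-- ===== SOURCE A (Python) =====
-- def _get_whitespace_values(string):
--     buffer = []
--     for s in string:
--         if len(buffer) == 0 or s == buffer[-1]:
--             buffer.append(s)
--         else:
--             yield buffer
--             buffer = [s]
--     if len(buffer) > 0:
--         yield buffer
-- ===== SOURCE B (Python) =====
-- def _get_whitespace_values(string):
--     # Slice-based run splitting: find the end of the leading run of equal
--     # characters, emit it as a slice, and continue on the remainder.
--     while string:
--         k = 1
--         while k < len(string) and string[k] == string[0]: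
--             k += 1
--         yield list(string[:k])
--         string = string[k:]
-- ===== Notes on version B (the rewrite author's own statement) =====
-- stated objective: alternative
-- what changed: Replaces the incremental buffer with len/last-element comparisons by a leading-run split: scan for the end of the first run of equal characters, yield that slice, and repeat on the remainder.
import Mathlib
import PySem

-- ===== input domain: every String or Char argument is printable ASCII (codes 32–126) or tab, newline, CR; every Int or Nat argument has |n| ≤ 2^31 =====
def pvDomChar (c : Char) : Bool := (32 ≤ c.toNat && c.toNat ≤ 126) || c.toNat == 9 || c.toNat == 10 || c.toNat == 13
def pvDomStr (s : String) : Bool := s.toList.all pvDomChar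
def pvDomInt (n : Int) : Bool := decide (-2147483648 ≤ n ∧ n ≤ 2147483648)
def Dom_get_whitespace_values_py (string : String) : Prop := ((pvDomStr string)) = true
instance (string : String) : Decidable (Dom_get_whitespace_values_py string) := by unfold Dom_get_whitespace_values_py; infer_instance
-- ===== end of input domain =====

-- B replaces A's incremental buffer loop by a leading-run split (find the end of the
-- first run, emit it as a slice, loop on the rest); objective: alternative decomposition.

-- ===== PORT A =====
-- one iteration of A's for-loop: state = (groups yielded so far, buffer)
def pvStepA (acc : List (List String) × List String) (c : Char) :
    List (List String) × List String :=
  if acc.2.length == 0 || PySem.List.pyGet? acc.2 (-1) == some (toString c) then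
    (acc.1, acc.2 ++ [toString c])
  else
    (acc.1 ++ [acc.2], [toString c])

def get_whitespace_values_py (string : String) : List (List String) :=
  let r := string.toList.foldl pvStepA ([], [])
  if r.2.length > 0 then r.1 ++ [r.2] else r.1

-- ===== PORT B =====
-- Source B's outer while: the inner while computes k = end of the leading run of equal
-- characters, string[:k] is yielded as a list of chars, the loop continues on string[k:]
def pvRunsB (cs : List Char) : List (List String) :=
  match cs with
  | [] => []
  | c :: rest =>
      let k := 1 + (rest.takeWhile (fun x => x == c)).length  -- inner while: k = end of leading run
      (((c :: rest).take k).map (fun ch => toString ch)) :: pvRunsB ((c :: rest).drop k)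
termination_by cs.length
decreasing_by simp

def get_whitespace_values_py_alt (string : String) : List (List String) :=
  pvRunsB string.toList

-- ===== PRECONDITION & SPEC =====
def Spec_get_whitespace_values_py (string : String) (out : List (List String)) : Prop := out = get_whitespace_values_py_alt string
instance (string : String) (out : List (List String)) : Decidable (Spec_get_whitespace_values_py string out) := by unfold Spec_get_whitespace_values_py; infer_instance

-- ===== CLAIM (what is proved, stated in full; the proofs are below) =====
def Claim_equal_get_whitespace_values_py : Prop := ∀ (string : String), Dom_get_whitespace_values_py string → Spec_get_whitespace_values_py string (get_whitespace_values_py string)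

-- ===== LEMMAS AND PROOFS =====

theorem pvRunsB_nil : pvRunsB [] = [] := by rw [pvRunsB.eq_def]

-- unfold pvRunsB on a cons into the takeWhile/dropWhile shape
theorem pvRunsB_cons (c : Char) (rest : List Char) :
    pvRunsB (c :: rest) =
      (toString c :: (rest.takeWhile (fun x => x == c)).map (fun ch => toString ch))
        :: pvRunsB (rest.dropWhile (fun x => x == c)) := by
  conv_lhs => rw [pvRunsB.eq_def]
  have ht : rest.take (rest.takeWhile (fun x => x == c)).length
      = rest.takeWhile (fun x => x == c) := by
    simp [List.takeWhile_eq_take_findIdx_not]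
  have hd : rest.drop (rest.takeWhile (fun x => x == c)).length
      = rest.dropWhile (fun x => x == c) := by
    simp [List.takeWhile_eq_take_findIdx_not, List.dropWhile_eq_drop_findIdx_not]
  simp only [Nat.add_comm 1, List.take_succ_cons, List.drop_succ_cons, List.map_cons, ht, hd]

theorem pvToStringChar_inj (c d : Char) (h : toString d = toString c) : d = c := by
  have h2 := congrArg String.toList h
  simp [toString, Char.toString] at h2
  exact h2

-- the finish step of A (the trailing 'if len(buffer) > 0: yield buffer')
def pvFinishA (r : List (List String) × List String) : List (List String) :=
  if r.2.length > 0 then r.1 ++ [r.2] else r.1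

-- loop invariant: with a nonempty buffer whose last element is toString c, running
-- A's loop and finishing equals emitting buffer extended by the leading run of c,
-- followed by B's runs of the remainder.
theorem pvKey (cs : List Char) : ∀ (out : List (List String)) (buf : List String) (c : Char),
    buf ≠ [] → PySem.List.pyGet? buf (-1) = some (toString c) →
    pvFinishA (cs.foldl pvStepA (out, buf)) =
      out ++ (buf ++ (cs.takeWhile (fun x => x == c)).map (fun ch => toString ch))
        :: pvRunsB (cs.dropWhile (fun x => x == c)) := by
  induction cs with
  | nil =>
      intro out buf c hne _
      simp [pvFinishA, List.length_pos_iff, hne, pvRunsB_nil]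
  | cons d rest ih =>
      intro out buf c hne hlast
      by_cases hdc : d = c
      · subst hdc
        have hs : pvStepA (out, buf) d = (out, buf ++ [toString d]) := by
          simp [pvStepA, hlast]
        simp only [List.foldl_cons, hs]
        rw [ih out (buf ++ [toString d]) d (by simp)
            (PySem.List.pyGet?_neg_one_append_singleton buf (toString d))]
        simp
      · have htoStr : toString d ≠ toString c := fun h => hdc (pvToStringChar_inj c d h)
        have hs : pvStepA (out, buf) d = (out ++ [buf], [toString d]) := by
          simp [pvStepA, hlast, hne]
          exact fun h => htoStr h.symm
        simp only [List.foldl_cons, hs]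
        rw [ih (out ++ [buf]) [toString d] d (by simp) (by simp [pysem])]
        have hdcne : (d == c) = false := by simp [hdc]
        simp [hdcne, pvRunsB_cons]

-- ===== VERDICT (by name: the statement is the Claim_ definition above) =====
theorem get_whitespace_values_py_spec : Claim_equal_get_whitespace_values_py := by
  intro s _
  unfold Spec_get_whitespace_values_py get_whitespace_values_py get_whitespace_values_py_alt
  cases hcs : s.toList with
  | nil => simp [pvRunsB_nil]
  | cons c rest =>
      show pvFinishA ((c :: rest).foldl pvStepA ([], [])) = pvRunsB (c :: rest)
      have hs : pvStepA ([], []) c = ([], [toString c]) := by simp [pvStepA]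
      simp only [List.foldl_cons, hs]
      rw [pvKey rest [] [toString c] c (by simp) (by simp [pysem])]
      simp [pvRunsB_cons]
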